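-- pv_equiv track=rewrite | github.com/canonical/cloud-init | cloudinit/distros/__init__.py | _get_arch_package_mirror_info
-- ===== SOURCE A (Python) =====
-- def _get_arch_package_mirror_info(package_mirrors, arch):
--     # pull out the specific arch from a 'package_mirrors' config option
--     default = None
--     for item in package_mirrors:
--         arches = item.get("arches")
--         if arch in arches:
--             return item
--         if "default" in arches:
--             default = item
--     return default
-- ===== SOURCE B (Python) =====
-- def _get_arch_package_mirror_info(package_mirrors, arch):
--     # Two-pass decomposition: first scan for an exact arch match,
--     # then (only if none) a last-wins scan for a 'default' entry.
--     for item in package_mirrors: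
--         if arch in item.get("arches"):
--             return item
--     default = None
--     for item in package_mirrors:
--         if "default" in item.get("arches"):
--             default = item
--     return default
-- ===== Notes on version B (the rewrite author's own statement) =====
-- stated objective: simpler
-- what changed: Replaces A's single interleaved loop with mixed state (early return + tracked default) by two independent passes: a first-match scan for the arch, then a last-wins scan for a 'default' entry.
import Mathlib
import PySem

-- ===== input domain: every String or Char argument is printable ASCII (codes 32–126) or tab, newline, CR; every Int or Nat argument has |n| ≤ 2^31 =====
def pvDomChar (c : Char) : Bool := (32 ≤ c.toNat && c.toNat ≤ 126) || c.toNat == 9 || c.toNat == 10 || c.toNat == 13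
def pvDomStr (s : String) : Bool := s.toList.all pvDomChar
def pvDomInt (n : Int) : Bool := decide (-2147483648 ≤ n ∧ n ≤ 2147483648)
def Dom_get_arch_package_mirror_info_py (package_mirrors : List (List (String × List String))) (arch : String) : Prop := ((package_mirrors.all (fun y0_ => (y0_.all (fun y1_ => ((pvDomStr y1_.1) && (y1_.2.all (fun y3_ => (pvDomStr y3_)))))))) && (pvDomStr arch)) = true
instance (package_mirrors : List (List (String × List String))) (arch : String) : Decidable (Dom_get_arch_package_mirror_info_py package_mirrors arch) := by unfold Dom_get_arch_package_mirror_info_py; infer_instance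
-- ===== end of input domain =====

-- B replaces A's single interleaved loop (early return + tracked default) by two
-- independent passes: a first-match scan for arch, then a last-wins scan for 'default';
-- objective: simpler.

-- item.get("arches"): first-match association-list lookup (Python dict .get)
def pvArches? (item : List (String × List String)) : Option (List String) :=
  (item.find? (fun kv => kv.1 == "arches")).map (fun kv => kv.2)

-- ===== PORT A =====
-- A's loop: early return on arch match, otherwise track the last 'default' item.
-- When .get returns None, Python raises TypeError on 'arch in None'; such inputs are
-- excluded by Pre_ below, and the port reads the missing value as [] there.
def pvAGo (arch : String) : List (List (String × List String)) → Option (List (String × List String)) → Option (List (String × List String))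
  | [], dflt => dflt
  | item :: rest, dflt =>
    let arches := (pvArches? item).getD []
    if arch ∈ arches then some item
    else pvAGo arch rest (if "default" ∈ arches then some item else dflt)

def get_arch_package_mirror_info_py (package_mirrors : List (List (String × List String))) (arch : String) : Option (List (String × List String)) :=
  pvAGo arch package_mirrors none

-- ===== PORT B =====
-- first pass: first item whose arches contains arch
def pvBFind (arch : String) : List (List (String × List String)) → Option (List (String × List String))
  | [] => none
  | item :: rest =>
    if arch ∈ (pvArches? item).getD [] then some item else pvBFind arch rest

-- second pass: last-wins scan for 'default'
def pvBDefault (package_mirrors : List (List (String × List String))) : Option (List (String × List String)) :=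
  package_mirrors.foldl
    (fun dflt item => if "default" ∈ (pvArches? item).getD [] then some item else dflt)
    none

def get_arch_package_mirror_info_py_alt (package_mirrors : List (List (String × List String))) (arch : String) : Option (List (String × List String)) :=
  match pvBFind arch package_mirrors with
  | some item => some item
  | none => pvBDefault package_mirrors

-- ===== PRECONDITION & SPEC =====
-- Pre_ excludes exactly the inputs on which Python A raises TypeError ('arch in None'):
-- some item scanned before the first arch match lacks the "arches" key.
def Pre_get_arch_package_mirror_info_py (package_mirrors : List (List (String × List String))) (arch : String) : Prop :=
  ∀ item ∈ package_mirrors.takeWhile (fun it => !(((pvArches? it).getD []).contains arch)),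
    (pvArches? item).isSome = true
instance (package_mirrors : List (List (String × List String))) (arch : String) : Decidable (Pre_get_arch_package_mirror_info_py package_mirrors arch) := by unfold Pre_get_arch_package_mirror_info_py; infer_instance

def pvWitness_get_arch_package_mirror_info_py : (List (List (String × List String))) × String :=
  ([[("arches", ["i386", "default"])], [("arches", ["amd64"])]], "amd64")

def Spec_get_arch_package_mirror_info_py (package_mirrors : List (List (String × List String))) (arch : String) (out : Option (List (String × List String))) : Prop := out = get_arch_package_mirror_info_py_alt package_mirrors arch
instance (package_mirrors : List (List (String × List String))) (arch : String) (out : Option (List (String × List String))) : Decidable (Spec_get_arch_package_mirror_info_py package_mirrors arch out) := by unfold Spec_get_arch_package_mirror_info_py; infer_instance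

-- ===== CLAIM (what is proved, stated in full; the proofs are below) =====
def Claim_equal_get_arch_package_mirror_info_py : Prop := ∀ (package_mirrors : List (List (String × List String))) (arch : String), Dom_get_arch_package_mirror_info_py package_mirrors arch → Pre_get_arch_package_mirror_info_py package_mirrors arch → Spec_get_arch_package_mirror_info_py package_mirrors arch (get_arch_package_mirror_info_py package_mirrors arch)

-- ===== LEMMAS AND PROOFS =====

-- A's interleaved loop equals: first-match result if any, else the last-wins fold seeded
-- with the accumulator.
theorem pvAGo_eq (arch : String) (pm : List (List (String × List String))) :
    ∀ dflt, pvAGo arch pm dflt =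
      match pvBFind arch pm with
      | some item => some item
      | none => pm.foldl
          (fun d item => if "default" ∈ (pvArches? item).getD [] then some item else d) dflt := by
  induction pm with
  | nil => intro dflt; rfl
  | cons item rest ih =>
    intro dflt
    simp only [pvAGo, pvBFind, List.foldl_cons]
    by_cases h : arch ∈ (pvArches? item).getD []
    · simp [h]
    · simp [h, ih]

-- ===== VERDICT (by name: the statement is the Claim_ definition above) =====
theorem get_arch_package_mirror_info_py_spec : Claim_equal_get_arch_package_mirror_info_py := by
  intro pm arch _ _
  unfold Spec_get_arch_package_mirror_info_py get_arch_package_mirror_info_py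
    get_arch_package_mirror_info_py_alt pvBDefault
  exact pvAGo_eq arch pm none
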